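-- pv_equiv track=rewrite | github.com/alexandru-dinu/project-euler | src/p9.py | get
-- ===== SOURCE A (Python) =====
-- alpha = 1000000
--
-- beta = 2000
--
-- def get(N):
--     for a in range(1, N + 1):
--         for b in range(a + 1, N + 1):
--             lhs = alpha + 2 * a * b
--             rhs = beta * (a + b)
--
--             if lhs == rhs:
--                 c = 1000 - a - b
--                 return a, b, c
-- ===== SOURCE B (Python) =====
-- alpha = 1000000
--
-- beta = 2000
--
-- def get(N):
--     # For each a, the condition alpha + 2ab = beta(a+b) is linear in b:
--     # b * (2a - beta) = beta*a - alpha, so solve for b directly.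
--     for a in range(1, N + 1):
--         den = 2 * a - beta
--         if den == 0:
--             continue
--         num = beta * a - alpha
--         if num % den != 0:
--             continue
--         b = num // den
--         if a + 1 <= b <= N:
--             return a, b, 1000 - a - b
-- ===== Notes on version B (the rewrite author's own statement) =====
-- stated objective: faster
-- what changed: Instead of scanning all b in an inner loop, B solves the linear equation b*(2a-2000)=2000a-1000000 for b in closed form per a and checks integrality and range, removing the inner loop.
import Mathlib
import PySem

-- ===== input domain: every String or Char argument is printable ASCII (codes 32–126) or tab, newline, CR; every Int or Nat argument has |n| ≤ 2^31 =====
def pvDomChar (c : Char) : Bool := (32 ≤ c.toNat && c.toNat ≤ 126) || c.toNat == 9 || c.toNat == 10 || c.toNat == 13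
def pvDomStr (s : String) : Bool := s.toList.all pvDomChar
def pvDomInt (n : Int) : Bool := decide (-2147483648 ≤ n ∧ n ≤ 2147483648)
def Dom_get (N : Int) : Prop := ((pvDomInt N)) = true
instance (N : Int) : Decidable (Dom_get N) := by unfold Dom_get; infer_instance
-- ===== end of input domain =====

-- B removes A's inner loop by solving the per-a linear equation for b in closed form (faster, asymptotic).


-- ===== PORT A =====
-- nested for-loops with early return, ported as nested findSome? over the same ranges
def get (N : Int) : Option (List Int) :=
  (PySem.List.pyRange 1 (N + 1) 1).findSome? (fun a =>
    (PySem.List.pyRange (a + 1) (N + 1) 1).findSome? (fun b =>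
      if 1000000 + 2 * a * b = 2000 * (a + b) then some [a, b, 1000 - a - b] else none))

-- ===== PORT B =====
-- single loop over a; solve b*(2a-2000) = 2000a-1000000 directly, check integrality and range
def get_alt (N : Int) : Option (List Int) :=
  (PySem.List.pyRange 1 (N + 1) 1).findSome? (fun a =>
    let den := 2 * a - 2000
    if den = 0 then none
    else
      let num := 2000 * a - 1000000
      if PySem.Int.mod num den ≠ 0 then none
      else
        let b := PySem.Int.floordiv num den
        if a + 1 ≤ b ∧ b ≤ N then some [a, b, 1000 - a - b] else none)

-- ===== PRECONDITION & SPEC =====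
def Spec_get (N : Int) (out : Option (List Int)) : Prop := out = get_alt N
instance (N : Int) (out : Option (List Int)) : Decidable (Spec_get N out) := by unfold Spec_get; infer_instance

-- ===== CLAIM (what is proved, stated in full; the proofs are below) =====
def Claim_equal_get : Prop := ∀ (N : Int), Dom_get N → Spec_get N (get N)

-- ===== LEMMAS AND PROOFS =====

-- findSome? of a function that is none except possibly at b₀
theorem findSome?_unique {α : Type} (l : List Int) (f : Int → Option α) (b₀ : Int)
    (h : ∀ b, b ≠ b₀ → f b = none) :
    l.findSome? f = if b₀ ∈ l then f b₀ else none := by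
  induction l with
  | nil => simp
  | cons x xs ih =>
    by_cases hx : x = b₀
    · subst hx
      cases hf : f x with
      | some v => simp [List.findSome?, hf]
      | none => simp [List.findSome?, hf, ih]
    · have hne : b₀ ≠ x := fun h' => hx h'.symm
      simp [List.findSome?, h x hx, ih, hne]

theorem inner_eq (N a : Int) :
    (PySem.List.pyRange (a + 1) (N + 1) 1).findSome? (fun b =>
      if 1000000 + 2 * a * b = 2000 * (a + b) then some [a, b, 1000 - a - b] else none)
    = (if 2 * a - 2000 = 0 then none
       else if PySem.Int.mod (2000 * a - 1000000) (2 * a - 2000) ≠ 0 then none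
       else if a + 1 ≤ PySem.Int.floordiv (2000 * a - 1000000) (2 * a - 2000) ∧
               PySem.Int.floordiv (2000 * a - 1000000) (2 * a - 2000) ≤ N then
         some [a, PySem.Int.floordiv (2000 * a - 1000000) (2 * a - 2000),
               1000 - a - PySem.Int.floordiv (2000 * a - 1000000) (2 * a - 2000)]
       else none) := by
  have key : ∀ b : Int, (1000000 + 2 * a * b = 2000 * (a + b)) ↔
      b * (2 * a - 2000) = 2000 * a - 1000000 := by
    intro b; constructor <;> intro h <;> nlinarith
  split_ifs with h0 hmod hr
  · -- a = 1000: no b satisfies the condition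
    rw [List.findSome?_eq_none_iff]
    intro b _
    simp only [ite_eq_right_iff]
    intro hb
    exfalso
    have ha : a = 1000 := by omega
    have h2 := (key b).mp hb
    rw [ha] at h2
    norm_num at h2
  · -- 2a - 2000 does not divide 2000a - 1000000: no integer b works
    rw [List.findSome?_eq_none_iff]
    intro b _
    simp only [ite_eq_right_iff]
    intro hb
    exfalso
    exact hmod ((PySem.Int.mod_eq_zero_iff_dvd _ _).mpr
      ⟨b, by linear_combination -((key b).mp hb)⟩)
  all_goals {
    -- divisible case: the unique candidate b₀
    have hmod' : PySem.Int.mod (2000 * a - 1000000) (2 * a - 2000) = 0 := by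
      by_contra h; exact hmod h
    have hb₀mul : PySem.Int.floordiv (2000 * a - 1000000) (2 * a - 2000) * (2 * a - 2000)
        = 2000 * a - 1000000 := by
      have h := PySem.Int.floordiv_mul_add_mod (2000 * a - 1000000) (2 * a - 2000)
      rw [hmod'] at h
      linarith
    have hnone : ∀ b, b ≠ PySem.Int.floordiv (2000 * a - 1000000) (2 * a - 2000) →
        (if 1000000 + 2 * a * b = 2000 * (a + b) then
          some [a, b, 1000 - a - b] else none) = none := by
      intro b hb
      simp only [ite_eq_right_iff]
      intro hcondb
      exact absurd (mul_right_cancel₀ h0 (((key b).mp hcondb).trans hb₀mul.symm)) hb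
    rw [findSome?_unique _ _ _ hnone]
    first
    | · rw [if_pos (by rw [PySem.List.mem_pyRange_one]; omega)]
        rw [if_pos ((key _).mpr hb₀mul)]
    | · rw [if_neg (by rw [PySem.List.mem_pyRange_one]; omega)]
  }

-- ===== VERDICT (by name: the statement is the Claim_ definition above) =====
theorem get_spec : Claim_equal_get := by
  intro N _
  unfold Spec_get _root_.get get_alt
  congr 1
  funext a
  exact inner_eq N a
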